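-- pv_equiv track=rewrite | github.com/justkalpane/Shadow-Creator-OS-Phase_01 | scripts/generate_build_values_snapshot.py | _parse_blockers
-- ===== SOURCE A (Python) =====
-- def _parse_blockers(text: str) -> list[dict[str, str]]:
--     blockers: list[dict[str, str]] = []
--     current: dict[str, str] | None = None
--     for raw_line in text.splitlines():
--         stripped = raw_line.strip()
--         if stripped.startswith("- blocker_id:"):
--             if current:
--                 blockers.append(current)
--             current = {"blocker_id": stripped.split(":", 1)[1].strip()}
--         elif current is not None and ":" in stripped:
--             key, value = stripped.split(":", 1)
--             current[key.strip()] = value.strip()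
--     if current:
--         blockers.append(current)
--     return blockers
-- ===== SOURCE B (Python) =====
-- def _parse_blockers(text: str) -> list[dict[str, str]]:
--     # Cursor-based parser: skip pre-header lines, then consume one group per
--     # header with a nested loop; no Optional "current" state, no trailing flush.
--     lines = text.splitlines()
--     n = len(lines)
--     i = 0
--     while i < n and not lines[i].strip().startswith("- blocker_id:"):
--         i += 1
--     result: list[dict[str, str]] = []
--     while i < n:
--         s = lines[i].strip()
--         d = {"blocker_id": s.split(":", 1)[1].strip()}
--         i += 1
--         while i < n:
--             s = lines[i].strip()
--             if s.startswith("- blocker_id:"):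
--                 break
--             if ":" in s:
--                 key, value = s.split(":", 1)
--                 d[key.strip()] = value.strip()
--             i += 1
--         result.append(d)
--     return result
-- ===== Notes on version B (the rewrite author's own statement) =====
-- stated objective: alternative
-- what changed: Replaces A's single fold with an Optional current-dict and a trailing flush by a cursor-based parser: skip pre-header lines, then an outer loop that opens a dict per header and a nested loop that consumes its body lines, appending each finished dict immediately.
import Mathlib
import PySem

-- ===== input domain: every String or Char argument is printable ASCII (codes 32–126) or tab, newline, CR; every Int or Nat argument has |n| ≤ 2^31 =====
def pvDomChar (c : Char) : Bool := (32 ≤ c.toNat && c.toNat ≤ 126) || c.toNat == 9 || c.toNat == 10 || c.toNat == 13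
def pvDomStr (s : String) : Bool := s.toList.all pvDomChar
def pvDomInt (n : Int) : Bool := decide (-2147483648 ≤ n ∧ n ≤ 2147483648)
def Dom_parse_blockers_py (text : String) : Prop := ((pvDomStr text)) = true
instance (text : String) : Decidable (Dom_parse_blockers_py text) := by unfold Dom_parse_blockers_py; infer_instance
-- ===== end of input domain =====

-- B replaces A's Optional-current fold with a cursor parser (skip prefix, then
-- one nested body-consuming loop per header); same O(n) cost, different decomposition.
-- Shared line-level helpers (both Pythons strip/split the same way):

-- stripped.startswith("- blocker_id:")
def pbIsHeader (s : List Char) : Bool := PySem.Chars.startswith s "- blocker_id:".toList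

-- stripped.split(":", 1)[1].strip()  (header line: ':' guaranteed present)
def pbHeadVal (s : List Char) : String :=
  String.mk (PySem.Chars.strip ((PySem.Chars.splitOnMax s [':'] 1).getD 1 []))

-- ===== PORT A =====
-- one step of A's for-loop; state = (blockers, current)
def pbStepA (st : List (PySem.Dict String String) × Option (PySem.Dict String String))
    (raw : List Char) : List (PySem.Dict String String) × Option (PySem.Dict String String) :=
  let stripped := PySem.Chars.strip raw
  if pbIsHeader stripped then
    let blockers :=
      match st.2 with
      | some cur => if cur.items.isEmpty then st.1 else st.1 ++ [cur]   -- "if current:"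
      | none => st.1
    (blockers, some (PySem.Dict.empty.insert "blocker_id" (pbHeadVal stripped)))
  else
    match st.2 with
    | some cur =>
      if PySem.Chars.isIn [':'] stripped then
        let parts := PySem.Chars.splitOnMax stripped [':'] 1
        (st.1, some (cur.insert (String.mk (PySem.Chars.strip (parts.getD 0 [])))
                                (String.mk (PySem.Chars.strip (parts.getD 1 [])))))
      else st
    | none => st

def parse_blockers_py (text : String) : List (List (String × String)) :=
  let fin := (PySem.Chars.splitlines text.toList).foldl pbStepA ([], none)
  let blockers :=
    match fin.2 with
    | some cur => if cur.items.isEmpty then fin.1 else fin.1 ++ [cur]   -- trailing "if current:"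
    | none => fin.1
  blockers.map (·.items)

-- ===== PORT B =====
-- if ":" in s: d[key.strip()] = value.strip()
def pbAddKV (d : PySem.Dict String String) (s : List Char) : PySem.Dict String String :=
  if PySem.Chars.isIn [':'] s then
    let parts := PySem.Chars.splitOnMax s [':'] 1
    d.insert (String.mk (PySem.Chars.strip (parts.getD 0 [])))
             (String.mk (PySem.Chars.strip (parts.getD 1 [])))
  else d

-- B's inner while: consume body lines until the next header (or end);
-- returns the finished dict and the unconsumed suffix (cursor position).
def pbConsume (d : PySem.Dict String String) : List (List Char) →
    PySem.Dict String String × List (List Char)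
  | [] => (d, [])
  | raw :: rest =>
    let s := PySem.Chars.strip raw
    if pbIsHeader s then (d, raw :: rest)
    else pbConsume (pbAddKV d s) rest

theorem pbConsume_length (d : PySem.Dict String String) (ls : List (List Char)) :
    (pbConsume d ls).2.length ≤ ls.length := by
  induction ls generalizing d with
  | nil => simp [pbConsume]
  | cons raw rest ih =>
    simp only [pbConsume]
    split
    · simp
    · exact Nat.le_succ_of_le (ih _)

-- B's outer while: each iteration starts at a header line
def pbGroups : List (List Char) → List (PySem.Dict String String)
  | [] => []
  | raw :: rest =>
    let s := PySem.Chars.strip raw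
    let d0 := PySem.Dict.empty.insert "blocker_id" (pbHeadVal s)
    let r := pbConsume d0 rest
    r.1 :: pbGroups r.2
termination_by ls => ls.length
decreasing_by exact Nat.lt_succ_of_le (pbConsume_length _ _)

-- B's first while: advance the cursor to the first header
def pbSkip : List (List Char) → List (List Char)
  | [] => []
  | raw :: rest => if pbIsHeader (PySem.Chars.strip raw) then raw :: rest else pbSkip rest

def parse_blockers_py_alt (text : String) : List (List (String × String)) :=
  (pbGroups (pbSkip (PySem.Chars.splitlines text.toList))).map (·.items)

-- ===== PRECONDITION & SPEC =====
def Spec_parse_blockers_py (text : String) (out : List (List (String × String))) : Prop := out = parse_blockers_py_alt text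
instance (text : String) (out : List (List (String × String))) : Decidable (Spec_parse_blockers_py text out) := by unfold Spec_parse_blockers_py; infer_instance

-- ===== CLAIM (what is proved, stated in full; the proofs are below) =====
def Claim_equal_parse_blockers_py : Prop := ∀ (text : String), Dom_parse_blockers_py text → Spec_parse_blockers_py text (parse_blockers_py text)

-- ===== LEMMAS AND PROOFS =====

-- A's finalization (the trailing "if current:" flush)
def pbFinal (st : List (PySem.Dict String String) × Option (PySem.Dict String String)) :
    List (PySem.Dict String String) :=
  match st.2 with
  | some cur => if cur.items.isEmpty then st.1 else st.1 ++ [cur]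
  | none => st.1

theorem pbInsert_ne_empty (d : PySem.Dict String String) (k v : String) :
    ((d.insert k v).items.isEmpty) = false := by
  rw [PySem.Dict.items_insert]
  split <;> rename_i h
  · cases hd : d.items with
    | nil => simp [PySem.Dict.contains, hd] at h
    | cons p rest => simp
  · simp

theorem pbAddKV_ne_empty (d : PySem.Dict String String) (s : List Char)
    (h : d.items.isEmpty = false) : ((pbAddKV d s).items.isEmpty) = false := by
  unfold pbAddKV
  split
  · exact pbInsert_ne_empty _ _ _
  · exact h

-- A from a live current dict = B's body consumption
theorem pbRunSome (ls : List (List Char)) (acc : List (PySem.Dict String String))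
    (d : PySem.Dict String String) (hd : d.items.isEmpty = false) :
    pbFinal (ls.foldl pbStepA (acc, some d)) =
      acc ++ ((pbConsume d ls).1 :: pbGroups (pbConsume d ls).2) := by
  induction ls generalizing acc d with
  | nil => simp [pbFinal, pbConsume, pbGroups, hd]
  | cons raw rest ih =>
    by_cases hh : pbIsHeader (PySem.Chars.strip raw) = true
    · have hstep : pbStepA (acc, some d) raw =
          (acc ++ [d], some (PySem.Dict.empty.insert "blocker_id" (pbHeadVal (PySem.Chars.strip raw)))) := by
        simp [pbStepA, hh, hd]
      rw [List.foldl_cons, hstep, ih _ _ (pbInsert_ne_empty _ _ _)]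
      have hc : pbConsume d (raw :: rest) = (d, raw :: rest) := by
        simp [pbConsume, hh]
      rw [hc]
      simp only [pbGroups]
      simp
    · have hstep : pbStepA (acc, some d) raw =
          (acc, some (pbAddKV d (PySem.Chars.strip raw))) := by
        simp only [pbStepA, pbAddKV, hh, Bool.false_eq_true, if_false]
        split <;> rfl
      rw [List.foldl_cons, hstep, ih _ _ (pbAddKV_ne_empty _ _ hd)]
      have hc : pbConsume d (raw :: rest) = pbConsume (pbAddKV d (PySem.Chars.strip raw)) rest := by
        simp [pbConsume, hh]
      rw [hc]

-- A before the first header = B's skip phase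
theorem pbRunNone (ls : List (List Char)) (acc : List (PySem.Dict String String)) :
    pbFinal (ls.foldl pbStepA (acc, none)) = acc ++ pbGroups (pbSkip ls) := by
  induction ls generalizing acc with
  | nil => simp [pbFinal, pbSkip, pbGroups]
  | cons raw rest ih =>
    by_cases hh : pbIsHeader (PySem.Chars.strip raw) = true
    · have hstep : pbStepA (acc, none) raw =
          (acc, some (PySem.Dict.empty.insert "blocker_id" (pbHeadVal (PySem.Chars.strip raw)))) := by
        simp [pbStepA, hh]
      rw [List.foldl_cons, hstep, pbRunSome _ _ _ (pbInsert_ne_empty _ _ _)]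
      simp only [pbSkip, hh, if_true, pbGroups]
    · have hstep : pbStepA (acc, none) raw = (acc, none) := by
        simp only [pbStepA, hh]
        simp
      rw [List.foldl_cons, hstep, ih]
      simp [pbSkip, hh]

-- ===== VERDICT (by name: the statement is the Claim_ definition above) =====
theorem parse_blockers_py_spec : Claim_equal_parse_blockers_py := by
  intro text _
  unfold Spec_parse_blockers_py parse_blockers_py parse_blockers_py_alt
  have := pbRunNone (PySem.Chars.splitlines text.toList) []
  simp only [pbFinal] at this
  simp only [this, List.nil_append]
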